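-- pv_equiv track=rewrite | github.com/jhong92-pro/Schonhage-Strassen-algorithm | SSA.py | mod_by_b
-- ===== SOURCE A (Python) =====
-- from typing import List
--
-- KARATSUBA_CUTOFF = 2**10  # note) this is an arbitrary value
--
-- def karatsuba_mul(a:int,b:int):
--     # a = a_front*2**n_half + a_back
--     # b = b_front*2**n_half + b_back
--     # a*b = z1**2*n + z2*2**n_half + z3
--     a_len = a.bit_length()
--     b_len = b.bit_length()
--     n = max(a_len,b_len)
--     if n<=KARATSUBA_CUTOFF:
--         return a*b
--     n_half = n>>1
--     a_front = a>>n_half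
--     b_front = b>>n_half
--     a_back  = a&((1<<n_half)-1)
--     b_back  = b&((1<<n_half)-1)
--     z1 = karatsuba_mul(a_front,b_front)
--     z3 = karatsuba_mul(a_back,b_back)
--     z2 = karatsuba_mul(a_back+a_front,a_back+b_back) - z1 - z3
--     return (z1<<n_half<<n_half) + (z2<<n_half) + z3
--
-- def mod_by_b(U:List[int],W:List[int],b:int):
--     logb = b.bit_length()-1
--     U_with_pad = 0
--     W_with_pad = 0
--     for i in range(len(U)):
--         U_with_pad = (U_with_pad<<(3*logb))|U[-1-i]&(b-1)
--         W_with_pad = (W_with_pad<<(3*logb))|W[-1-i]&(b-1)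
--     Y_with_pad = karatsuba_mul(U_with_pad, W_with_pad)
--     Y_mod_b = [0]*len(U)
--     for i in range(len(Y_mod_b)):
--         Y_mod_b[i] = Y_with_pad&(b-1)
--         Y_with_pad = Y_with_pad>>(3*logb)
--     return Y_mod_b
-- ===== SOURCE B (Python) =====
-- from typing import List
--
-- KARATSUBA_CUTOFF = 2**10
--
-- def _karatsuba_iter(a: int, b: int) -> int:
--     # same recurrence as the recursive helper, evaluated with an explicit
--     # work stack and a value stack instead of recursion
--     work = [("call", a, b)]
--     vals = []
--     while work:
--         t = work.pop()
--         if t[0] == "call":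
--             x, y = t[1], t[2]
--             n = max(x.bit_length(), y.bit_length())
--             if n <= KARATSUBA_CUTOFF:
--                 vals.append(x * y)
--             else:
--                 h = n >> 1
--                 xf, yf = x >> h, y >> h
--                 xb, yb = x & ((1 << h) - 1), y & ((1 << h) - 1)
--                 work.append(("combine", h))
--                 work.append(("call", xb + xf, xb + yb))
--                 work.append(("call", xb, yb))
--                 work.append(("call", xf, yf))
--         else:
--             h = t[1]
--             z2m = vals.pop()
--             z3 = vals.pop()
--             z1 = vals.pop()
--             z2 = z2m - z1 - z3
--             vals.append((z1 << (2 * h)) + (z2 << h) + z3)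
--     return vals[-1]
--
-- def mod_by_b(U: List[int], W: List[int], b: int):
--     logb = b.bit_length() - 1
--     s = 3 * logb
--     mask = b - 1
--     n = len(U)
--     u = sum((x & mask) << (s * i) for i, x in enumerate(U))
--     w = sum((x & mask) << (s * i) for i, x in enumerate(W[len(W) - n:]))
--     y = _karatsuba_iter(u, w)
--     return [(y >> (s * i)) & mask for i in range(n)]
-- ===== Notes on version B (the rewrite author's own statement) =====
-- stated objective: alternative
-- what changed: packing and unpacking become closed-form shift/sum comprehensions instead of shift-or accumulator loops, and the (typo-carrying) Karatsuba recursion is evaluated iteratively with an explicit work/value stack instead of by recursion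
-- outside the precondition, e.g. on mod_by_b([-16, -4], [-13, 11], -4): A returns [208, 3], B returns [-364848, -5701]
import Mathlib
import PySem

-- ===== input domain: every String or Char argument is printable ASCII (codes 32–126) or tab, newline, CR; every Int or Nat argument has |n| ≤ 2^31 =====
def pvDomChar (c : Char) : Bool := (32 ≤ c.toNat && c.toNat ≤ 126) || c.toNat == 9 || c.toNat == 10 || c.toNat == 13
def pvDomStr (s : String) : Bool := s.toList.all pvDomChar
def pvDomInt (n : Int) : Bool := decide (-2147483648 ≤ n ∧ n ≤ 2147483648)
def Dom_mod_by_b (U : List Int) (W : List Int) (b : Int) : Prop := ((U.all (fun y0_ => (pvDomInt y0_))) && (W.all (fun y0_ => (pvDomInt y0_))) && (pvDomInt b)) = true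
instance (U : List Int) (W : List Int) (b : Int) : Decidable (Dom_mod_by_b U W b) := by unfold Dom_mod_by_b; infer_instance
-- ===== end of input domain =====

-- B replaces the two shift-or accumulator loops of A by closed-form shift/sum comprehensions and
-- evaluates the same (typo-carrying) Karatsuba recurrence with an explicit work/value stack instead
-- of by recursion; same values, no speed claim.

-- ===== PORT A =====
-- bit length of a natural number, = Python's int.bit_length on the nonnegative ints reached here
def natBL (m : Nat) : Nat := PySem.Int.bitLength (m : Int)

theorem lt_two_pow_natBL (m : Nat) : m < 2 ^ natBL m := by
  have h := PySem.Int.lt_two_pow_bitLength (m : Int)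
  simpa [natBL] using h

theorem natBL_le {m k : Nat} (h : m < 2 ^ k) : natBL m ≤ k := by
  by_contra hk
  rcases Nat.eq_zero_or_pos m with hm | hm
  · exact hk (hm ▸ (by simpa [natBL] using (Nat.zero_le k : (0:Nat) ≤ k)))
  · have h2 : 2 ^ (natBL m - 1) ≤ m := by
      simpa [natBL] using PySem.Int.two_pow_bitLength_le (m : Int) (by exact_mod_cast hm.ne')
    exact Nat.lt_irrefl m (Nat.lt_of_lt_of_le
      (Nat.lt_of_lt_of_le h (Nat.pow_le_pow_right (by decide) (Nat.le_sub_one_of_lt (Nat.lt_of_not_le hk)))) h2)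

theorem front_lt {x n : Nat} (h : Nat) (hx : x < 2 ^ n) : x >>> h < 2 ^ (n - h) := by
  rw [Nat.shiftRight_eq_div_pow]
  exact Nat.div_lt_of_lt_mul (Nat.lt_of_lt_of_le hx
    (by rw [← Nat.pow_add]
        exact Nat.pow_le_pow_right (by decide)
          (Nat.add_comm (n - h) h ▸ Nat.le_add_of_sub_le (Nat.le_refl (n - h)))))

theorem back_lt (x h : Nat) : x &&& ((1 <<< h) - 1) < 2 ^ h := by
  have h1 : (1 : Nat) <<< h = 2 ^ h := by rw [Nat.shiftLeft_eq, Nat.one_mul]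
  rw [← h1]
  exact Nat.lt_of_le_of_lt Nat.and_le_right (Nat.sub_lt (h1 ▸ Nat.pow_pos (by decide)) Nat.one_pos)

-- bounds on the bit lengths of the recursive-call arguments (cited by both termination proofs)
theorem kar_child_core (a b n : Nat) (hn0 : 1025 ≤ n) (ha : a < 2 ^ n) (hb : b < 2 ^ n) :
    natBL (a >>> (n >>> 1)) < n ∧ natBL (a &&& ((1 <<< (n >>> 1)) - 1)) < n ∧
    natBL ((a &&& ((1 <<< (n >>> 1)) - 1)) + a >>> (n >>> 1)) < n ∧
    natBL ((a &&& ((1 <<< (n >>> 1)) - 1)) + (b &&& ((1 <<< (n >>> 1)) - 1))) < n := by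
  have hh : n >>> 1 = n / 2 := Nat.shiftRight_one n
  set h := n >>> 1 with hhdef
  have hh2 : 2 ≤ h := hh ▸ (Nat.le_div_iff_mul_le (by decide)).mpr (Nat.le_trans (by decide) hn0)
  have hsum : h + h ≤ n := by
    have := Nat.div_mul_le_self n 2
    rw [Nat.mul_two] at this
    exact hh ▸ this
  have hhn : h + 2 ≤ n := Nat.le_trans (Nat.add_le_add_left hh2 h) hsum
  have haf := front_lt h ha
  have hab := back_lt a h
  have hbb := back_lt b h
  have hmono : (2:Nat) ^ h ≤ 2 ^ (n - h) :=
    Nat.pow_le_pow_right (by decide) (Nat.le_sub_of_add_le hsum)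
  have hs1 : (a &&& ((1 <<< h) - 1)) + a >>> h < 2 ^ (n - h + 1) :=
    Nat.lt_of_lt_of_le (Nat.add_lt_add hab haf)
      ((Nat.add_le_add_right hmono _).trans (Nat.le_of_eq (Nat.two_pow_succ _).symm))
  have hs2 : (a &&& ((1 <<< h) - 1)) + (b &&& ((1 <<< h) - 1)) < 2 ^ (h + 1) :=
    Nat.lt_of_lt_of_le (Nat.add_lt_add hab hbb) (Nat.le_of_eq (Nat.two_pow_succ _).symm)
  have hn1 : 0 < n := Nat.lt_of_lt_of_le (by decide) hn0
  have hnh_lt : n - h < n := Nat.sub_lt hn1 (Nat.lt_of_lt_of_le (by decide) hh2)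
  have hh_lt : h < n := Nat.lt_of_succ_le (Nat.le_trans (Nat.add_le_add_left (by decide : (1:Nat) ≤ 2) h) hhn)
  have hnh1_lt : n - h + 1 < n := by
    have e1 : n - h + 1 ≤ n - 2 + 1 := Nat.add_le_add_right (Nat.sub_le_sub_left hh2 n) 1
    have e2 : n - 2 + 1 = n - 1 := by
      rw [← Nat.succ_sub_succ n 1, ← Nat.succ_sub_succ (n + 1) 2]
      exact (Nat.succ_sub (Nat.le_trans (by decide) hn0)).symm
    exact Nat.lt_of_le_of_lt (e2 ▸ e1) (Nat.sub_lt hn1 Nat.one_pos)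
  have hh1_lt : h + 1 < n := Nat.lt_of_succ_le hhn
  exact ⟨Nat.lt_of_le_of_lt (natBL_le haf) hnh_lt,
         Nat.lt_of_le_of_lt (natBL_le hab) hh_lt,
         Nat.lt_of_le_of_lt (natBL_le hs1) hnh1_lt,
         Nat.lt_of_le_of_lt (natBL_le hs2) hh1_lt⟩

theorem kar_child_bounds (a b : Nat) (hn : ¬ max (natBL a) (natBL b) ≤ 1024) :
    max (natBL (a >>> (max (natBL a) (natBL b) >>> 1))) (natBL (b >>> (max (natBL a) (natBL b) >>> 1)))
        < max (natBL a) (natBL b) ∧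
    max (natBL (a &&& ((1 <<< (max (natBL a) (natBL b) >>> 1)) - 1)))
        (natBL (b &&& ((1 <<< (max (natBL a) (natBL b) >>> 1)) - 1))) < max (natBL a) (natBL b) ∧
    max (natBL ((a &&& ((1 <<< (max (natBL a) (natBL b) >>> 1)) - 1)) + a >>> (max (natBL a) (natBL b) >>> 1)))
        (natBL ((a &&& ((1 <<< (max (natBL a) (natBL b) >>> 1)) - 1)) + (b &&& ((1 <<< (max (natBL a) (natBL b) >>> 1)) - 1))))
        < max (natBL a) (natBL b) := by
  have hn0 : 1025 ≤ max (natBL a) (natBL b) := Nat.lt_of_not_le hn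
  have ha : a < 2 ^ max (natBL a) (natBL b) :=
    Nat.lt_of_lt_of_le (lt_two_pow_natBL a) (Nat.pow_le_pow_right (by decide) (Nat.le_max_left _ _))
  have hb : b < 2 ^ max (natBL a) (natBL b) :=
    Nat.lt_of_lt_of_le (lt_two_pow_natBL b) (Nat.pow_le_pow_right (by decide) (Nat.le_max_right _ _))
  have ca := kar_child_core a b (max (natBL a) (natBL b)) hn0 ha hb
  have cb := kar_child_core b a (max (natBL a) (natBL b)) hn0 hb ha
  exact ⟨Nat.max_lt.mpr ⟨ca.1, cb.1⟩, Nat.max_lt.mpr ⟨ca.2.1, cb.2.1⟩,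
         Nat.max_lt.mpr ⟨ca.2.2.1, ca.2.2.2⟩⟩

theorem kar_dec1 (a b : Nat) (h : ¬ max (natBL a) (natBL b) ≤ 1024) :
    max (natBL (a >>> (max (natBL a) (natBL b) >>> 1))) (natBL (b >>> (max (natBL a) (natBL b) >>> 1)))
      < max (natBL a) (natBL b) := (kar_child_bounds a b h).1

theorem kar_dec2 (a b : Nat) (h : ¬ max (natBL a) (natBL b) ≤ 1024) :
    max (natBL (a &&& ((1 <<< (max (natBL a) (natBL b) >>> 1)) - 1)))
      (natBL (b &&& ((1 <<< (max (natBL a) (natBL b) >>> 1)) - 1))) < max (natBL a) (natBL b) :=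
  (kar_child_bounds a b h).2.1

theorem kar_dec3 (a b : Nat) (h : ¬ max (natBL a) (natBL b) ≤ 1024) :
    max (natBL ((a &&& ((1 <<< (max (natBL a) (natBL b) >>> 1)) - 1)) + a >>> (max (natBL a) (natBL b) >>> 1)))
      (natBL ((a &&& ((1 <<< (max (natBL a) (natBL b) >>> 1)) - 1)) + (b &&& ((1 <<< (max (natBL a) (natBL b) >>> 1)) - 1))))
      < max (natBL a) (natBL b) := (kar_child_bounds a b h).2.2

-- karatsuba_mul, transliterated; only ever called on nonnegative ints (the packed operands), so Nat
-- arguments are exact; the result can be negative (the z2 recursive call has A's typo), hence Int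
def karatsuba_mul (a : Nat) (b : Nat) : Int :=
  let a_len := natBL a
  let b_len := natBL b
  let n := max a_len b_len
  if n ≤ 1024 then (a : Int) * (b : Int)
  else
    let n_half := n >>> 1
    let a_front := a >>> n_half
    let b_front := b >>> n_half
    let a_back := a &&& ((1 <<< n_half) - 1)
    let b_back := b &&& ((1 <<< n_half) - 1)
    let z1 := karatsuba_mul a_front b_front
    let z3 := karatsuba_mul a_back b_back
    let z2 := karatsuba_mul (a_back + a_front) (a_back + b_back) - z1 - z3
    ((z1 <<< n_half) <<< n_half) + (z2 <<< n_half) + z3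
termination_by max (natBL a) (natBL b)
decreasing_by
  · exact kar_dec1 a b (by assumption)
  · exact kar_dec2 a b (by assumption)
  · exact kar_dec3 a b (by assumption)

-- A's second loop: Y_mod_b[i] = Y & (b-1); Y >>= s
def extract_loop : Nat → Int → Nat → Int → List Int
  | 0, _, _, _ => []
  | k + 1, y, s, m => PySem.Int.band y m :: extract_loop k (y >>> s) s m

def mod_by_b (U : List Int) (W : List Int) (b : Int) : List Int :=
  -- b.bit_length() - 1 as a Nat: exact for b ≥ 1 (Pre_); for b = 0 Python raises at the negative shift
  let logb : Nat := PySem.Int.bitLength b - 1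
  let p := (List.range U.length).foldl
    (fun (acc : Int × Int) (i : Nat) =>
      (PySem.Int.bor (acc.1 <<< (3 * logb)) (PySem.Int.band (PySem.List.pyGetD U (-1 - (i : Int)) 0) (b - 1)),
       PySem.Int.bor (acc.2 <<< (3 * logb)) (PySem.Int.band (PySem.List.pyGetD W (-1 - (i : Int)) 0) (b - 1))))
    (0, 0)
  -- under Pre_ (b ≥ 1) both packed operands are nonnegative, so .toNat is exact
  let Y := karatsuba_mul p.1.toNat p.2.toNat
  extract_loop U.length Y (3 * logb) (b - 1)

-- ===== PORT B =====
-- explicit work/value stacks of B's _karatsuba_iter (list head = top of the Python stack)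
inductive KTask
  | call : Nat → Nat → KTask
  | combine : Nat → KTask
deriving DecidableEq, Repr

-- weight of a pending task, for termination of the stack evaluator
def ktaskWt : KTask → Nat
  | KTask.call a b => 4 ^ (max (natBL a) (natBL b) + 1)
  | KTask.combine _ => 1

theorem sum_cons_lt (t0 : KTask) (work : List KTask) (h : 0 < ktaskWt t0) :
    (work.map ktaskWt).sum < ((t0 :: work).map ktaskWt).sum := by
  rw [List.map_cons, List.sum_cons]
  exact Nat.lt_add_of_pos_left h

theorem sum_cons4_lt (t1 t2 t3 t4 t0 : KTask) (work : List KTask)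
    (h : ktaskWt t1 + ktaskWt t2 + ktaskWt t3 + ktaskWt t4 < ktaskWt t0) :
    ((t1 :: t2 :: t3 :: t4 :: work).map ktaskWt).sum < ((t0 :: work).map ktaskWt).sum := by
  rw [List.map_cons, List.map_cons, List.map_cons, List.map_cons, List.map_cons,
      List.sum_cons, List.sum_cons, List.sum_cons, List.sum_cons, List.sum_cons]
  have h2 := Nat.add_lt_add_right h ((work.map ktaskWt).sum)
  rw [Nat.add_assoc, Nat.add_assoc, Nat.add_assoc] at h2
  exact h2

theorem pow4_lt (m1 m2 m3 n : Nat) (h1 : m1 < n) (h2 : m2 < n) (h3 : m3 < n) (hn : 1 ≤ n) :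
    4 ^ (m1 + 1) + 4 ^ (m2 + 1) + 4 ^ (m3 + 1) + 1 < 4 ^ (n + 1) := by
  have p1 : (4:Nat) ^ (m1 + 1) ≤ 4 ^ n := Nat.pow_le_pow_right (by decide) h1
  have p2 : (4:Nat) ^ (m2 + 1) ≤ 4 ^ n := Nat.pow_le_pow_right (by decide) h2
  have p3 : (4:Nat) ^ (m3 + 1) ≤ 4 ^ n := Nat.pow_le_pow_right (by decide) h3
  have hp : 2 ≤ (4:Nat) ^ n := Nat.le_trans (by decide) (Nat.pow_le_pow_right (by decide) hn)
  have e2 : (4:Nat) ^ n * 4 = 4 ^ n + 4 ^ n + 4 ^ n + 4 ^ n := by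
    rw [Nat.mul_succ, Nat.mul_succ, Nat.mul_succ, Nat.mul_one]
  rw [pow_succ 4 n, e2]
  exact Nat.lt_of_le_of_lt
    (Nat.add_le_add (Nat.add_le_add (Nat.add_le_add p1 p2) p3) (Nat.le_refl 1))
    (Nat.add_lt_add_left hp _)

theorem karRun_dec1 (x y : Nat) (work : List KTask) :
    (work.map ktaskWt).sum < ((KTask.call x y :: work).map ktaskWt).sum :=
  sum_cons_lt _ work (Nat.pow_pos (by decide))

theorem karRun_dec2 (x y : Nat) (work : List KTask) (hc : ¬ max (natBL x) (natBL y) ≤ 1024) :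
    ((KTask.call (x >>> (max (natBL x) (natBL y) >>> 1)) (y >>> (max (natBL x) (natBL y) >>> 1)) ::
       KTask.call (x &&& ((1 <<< (max (natBL x) (natBL y) >>> 1)) - 1)) (y &&& ((1 <<< (max (natBL x) (natBL y) >>> 1)) - 1)) ::
       KTask.call ((x &&& ((1 <<< (max (natBL x) (natBL y) >>> 1)) - 1)) + x >>> (max (natBL x) (natBL y) >>> 1))
         ((x &&& ((1 <<< (max (natBL x) (natBL y) >>> 1)) - 1)) + (y &&& ((1 <<< (max (natBL x) (natBL y) >>> 1)) - 1))) ::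
       KTask.combine (max (natBL x) (natBL y) >>> 1) :: work).map ktaskWt).sum
      < ((KTask.call x y :: work).map ktaskWt).sum := by
  have hb := kar_child_bounds x y hc
  exact sum_cons4_lt _ _ _ _ _ work
    (pow4_lt _ _ _ _ hb.1 hb.2.1 hb.2.2 (Nat.le_trans (by decide) (Nat.lt_of_not_le hc)))

theorem karRun_dec3 (h : Nat) (work : List KTask) :
    (work.map ktaskWt).sum < ((KTask.combine h :: work).map ktaskWt).sum :=
  sum_cons_lt _ work Nat.one_pos

def karRun : List KTask → List Int → Int
  | [], vals => vals.headD 0      -- vals[-1]; vals is a singleton whenever this is reached from karatsuba_iter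
  | KTask.call x y :: work, vals =>
    let n := max (natBL x) (natBL y)
    if n ≤ 1024 then karRun work (((x : Int) * (y : Int)) :: vals)
    else
      let h := n >>> 1
      let xf := x >>> h
      let yf := y >>> h
      let xb := x &&& ((1 <<< h) - 1)
      let yb := y &&& ((1 <<< h) - 1)
      karRun (KTask.call xf yf :: KTask.call xb yb :: KTask.call (xb + xf) (xb + yb) :: KTask.combine h :: work) vals
  | KTask.combine h :: work, vals =>
    match vals with
    | z2m :: z3 :: z1 :: rest =>
      let z2 := z2m - z1 - z3
      karRun work (((z1 <<< (2 * h)) + (z2 <<< h) + z3) :: rest)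
    | _ => 0      -- Python would raise IndexError here; unreachable from karatsuba_iter
termination_by work _ => (work.map ktaskWt).sum
decreasing_by
  · exact karRun_dec1 x y work
  · exact karRun_dec2 x y work (by assumption)
  · exact karRun_dec3 h work

def karatsuba_iter (a : Nat) (b : Nat) : Int := karRun [KTask.call a b] []

def mod_by_b_alt (U : List Int) (W : List Int) (b : Int) : List Int :=
  let logb : Nat := PySem.Int.bitLength b - 1   -- exact for b ≥ 1 (Pre_), as in the A port
  let s := 3 * logb
  let mask := b - 1
  let n := U.length
  -- enumerate indices are nonnegative, so p.1.toNat is exact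
  let u := ((PySem.List.enumerate U).map (fun p => (PySem.Int.band p.2 mask) <<< (s * p.1.toNat))).sum
  let w := ((PySem.List.enumerate (PySem.List.slice W (some ((W.length : Int) - (n : Int))) none)).map
      (fun p => (PySem.Int.band p.2 mask) <<< (s * p.1.toNat))).sum
  let y := karatsuba_iter u.toNat w.toNat
  (List.range n).map (fun i => PySem.Int.band (y >>> (s * i)) mask)

-- ===== PRECONDITION & SPEC =====
-- Pre_ excludes b = 0 (Python raises ValueError: negative shift count) and len(W) < len(U) (IndexError);
-- it also excludes b < 0, where A returns: a negative modulus is outside the function's natural domain and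
-- A's shift-or packing with the negative mask b-1 there is an accident of its implementation (see cites).
def Pre_mod_by_b (U : List Int) (W : List Int) (b : Int) : Prop := 1 ≤ b ∧ U.length ≤ W.length
instance (U : List Int) (W : List Int) (b : Int) : Decidable (Pre_mod_by_b U W b) := by
  unfold Pre_mod_by_b; infer_instance

def pvWitness_mod_by_b : List Int × List Int × Int := ([3, 5], [2, 7, 1], 4)

def Spec_mod_by_b (U : List Int) (W : List Int) (b : Int) (out : List Int) : Prop := out = mod_by_b_alt U W b
instance (U : List Int) (W : List Int) (b : Int) (out : List Int) : Decidable (Spec_mod_by_b U W b out) := by unfold Spec_mod_by_b; infer_instance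

-- ===== CLAIM (what is proved, stated in full; the proofs are below) =====
def Claim_equal_mod_by_b : Prop := ∀ (U : List Int) (W : List Int) (b : Int), Dom_mod_by_b U W b → Pre_mod_by_b U W b → Spec_mod_by_b U W b (mod_by_b U W b)

-- ===== LEMMAS AND PROOFS =====
theorem band_mask_bounds (x m : Int) (hm : 0 ≤ m) :
    0 ≤ PySem.Int.band x m ∧ PySem.Int.band x m ≤ m := by
  unfold PySem.Int.band
  by_cases hx : 0 ≤ x
  · rw [if_pos hx, if_pos hm]
    have := Nat.and_le_right (n := x.toNat) (m := m.toNat)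
    omega
  · rw [if_neg hx, if_pos hm]
    have := Nat.sub_le m.toNat (m.toNat &&& (-x - 1).toNat)
    omega

theorem bor_shift_add {x c : Int} (s : Nat) (hx : 0 ≤ x) (hc : 0 ≤ c) (hlt : c < 2 ^ s) :
    PySem.Int.bor (x <<< s) c = x * 2 ^ s + c := by
  have hxs : 0 ≤ x <<< s := by rw [Int.shiftLeft_eq]; positivity
  rw [PySem.Int.bor_of_nonneg hxs hc]
  have hxx : ((x.toNat : Int)) = x := Int.toNat_of_nonneg hx
  have key : x * 2 ^ s = ((x.toNat * 2 ^ s : Nat) : Int) := by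
    rw [Nat.cast_mul, hxx]; push_cast; ring
  have h1 : (x <<< s).toNat = x.toNat <<< s := by
    rw [Int.shiftLeft_eq, key, Int.toNat_natCast, Nat.shiftLeft_eq]
  have hlt' : c.toNat < 2 ^ s := by
    have h2 : ((2:Int) ^ s) = ((2 ^ s : Nat) : Int) := by push_cast; ring
    omega
  rw [h1, ← Nat.shiftLeft_add_eq_or_of_lt hlt']
  push_cast [Nat.shiftLeft_eq]
  rw [hxx, Int.toNat_of_nonneg hc]

theorem foldA (s : Nat) (m : Int) (hm : 0 ≤ m) (hmlt : m < 2 ^ s) (f : Nat → Int)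
    (hf : ∀ i, 0 ≤ f i ∧ f i ≤ m) :
    ∀ (n : Nat) (acc : Int), 0 ≤ acc →
      (List.range n).foldl (fun a i => PySem.Int.bor (a <<< s) (f i)) acc
        = acc * 2 ^ (s * n) + ∑ i ∈ Finset.range n, f i * 2 ^ (s * (n - 1 - i)) := by
  intro n
  induction n with
  | zero => intro acc hacc; simp
  | succ n ih =>
    intro acc hacc
    rw [List.range_succ, List.foldl_append, ih acc hacc]
    simp only [List.foldl_cons, List.foldl_nil]
    have hsum_nonneg : 0 ≤ ∑ i ∈ Finset.range n, f i * 2 ^ (s * (n - 1 - i)) := by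
      apply Finset.sum_nonneg
      intro i _
      exact mul_nonneg (hf i).1 (by positivity)
    rw [bor_shift_add s (by positivity) (hf n).1 (lt_of_le_of_lt (hf n).2 hmlt)]
    rw [add_mul, Finset.sum_mul, Finset.sum_range_succ]
    have e1 : acc * 2 ^ (s * n) * 2 ^ s = acc * 2 ^ (s * (n + 1)) := by
      rw [mul_assoc, ← pow_add, Nat.mul_succ]
    have e2 : ∀ i ∈ Finset.range n, f i * 2 ^ (s * (n - 1 - i)) * 2 ^ s = f i * 2 ^ (s * (n + 1 - 1 - i)) := by
      intro i hi
      simp only [Finset.mem_range] at hi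
      have h3 : n + 1 - 1 - i = (n - 1 - i) + 1 := by omega
      rw [h3, mul_assoc, ← pow_add, Nat.mul_succ]
    rw [Finset.sum_congr rfl e2, e1]
    have : n + 1 - 1 - n = 0 := by omega
    rw [this]
    ring

theorem sumB (s : Nat) (m : Int) (L : List Int) :
    ∀ (k : Nat),
      ((PySem.List.enumerate L (k : Int)).map (fun p => (PySem.Int.band p.2 m) <<< (s * p.1.toNat))).sum
        = ∑ j ∈ Finset.range L.length, PySem.Int.band (L.getD j 0) m * 2 ^ (s * (k + j)) := by
  induction L with
  | nil => intro k; simp [PySem.List.enumerate_nil]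
  | cons x xs ih =>
    intro k
    rw [PySem.List.enumerate_cons]
    simp only [List.map_cons, List.sum_cons]
    have hcast : ((k : Int) + 1) = (((k + 1 : Nat)) : Int) := by push_cast; ring
    rw [hcast, ih (k + 1)]
    simp only [List.length_cons]
    rw [Finset.sum_range_succ']
    simp only [List.getD_cons_succ, List.getD_cons_zero, Int.toNat_natCast, Int.shiftLeft_eq]
    have : ∀ j ∈ Finset.range xs.length,
        PySem.Int.band (xs.getD j 0) m * 2 ^ (s * (k + 1 + j)) = PySem.Int.band (xs.getD j 0) m * 2 ^ (s * (k + (j + 1))) := by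
      intro j _; congr 2; ring
    rw [Finset.sum_congr rfl this]
    ring

theorem mask_lt {b : Int} (hb : 1 ≤ b) :
    b - 1 < 2 ^ (3 * (PySem.Int.bitLength b - 1)) := by
  rcases eq_or_lt_of_le hb with h1 | h2
  · simp [← h1]
  · -- b ≥ 2
    have hBL := PySem.Int.lt_two_pow_bitLength b
    have habs : b.natAbs = b.toNat := by omega
    have hge2 : 2 ≤ PySem.Int.bitLength b := by
      by_contra hlt
      have : (2:Nat) ^ PySem.Int.bitLength b ≤ 2 ^ 1 := Nat.pow_le_pow_right (by omega) (by omega)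
      omega
    have hexp : PySem.Int.bitLength b ≤ 3 * (PySem.Int.bitLength b - 1) := by omega
    have hmono : (2:Nat) ^ PySem.Int.bitLength b ≤ 2 ^ (3 * (PySem.Int.bitLength b - 1)) :=
      Nat.pow_le_pow_right (by omega) hexp
    have hc : ((2:Int) ^ (3 * (PySem.Int.bitLength b - 1))) = ((2 ^ (3 * (PySem.Int.bitLength b - 1)) : Nat) : Int) := by
      push_cast; ring
    omega


theorem extract_loop_eq (s : Nat) (m : Int) :
    ∀ (k : Nat) (y : Int),
      extract_loop k y s m = (List.range k).map (fun i => PySem.Int.band (y >>> (s * i)) m) := by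
  intro k
  induction k with
  | zero => intro y; simp [extract_loop]
  | succ k ih =>
    intro y
    rw [extract_loop, ih, List.range_succ_eq_map]
    simp only [List.map_cons, List.map_map]
    congr 1
    · simp
    · apply List.map_congr_left
      intro i _
      simp only [Function.comp_apply]
      have : s * Nat.succ i = s + s * i := by rw [Nat.mul_succ, Nat.add_comm]
      rw [this, Int.shiftRight_add]

theorem karRun_call_cutoff {x y : Nat} (hc : max (natBL x) (natBL y) ≤ 1024)
    (work : List KTask) (vals : List Int) :
    karRun (KTask.call x y :: work) vals = karRun work (((x : Int) * (y : Int)) :: vals) := by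
  rw [karRun]; simp only [hc, if_true]

theorem karRun_call_big {x y : Nat} (hc : ¬ max (natBL x) (natBL y) ≤ 1024)
    (work : List KTask) (vals : List Int) :
    karRun (KTask.call x y :: work) vals =
      karRun (KTask.call (x >>> (max (natBL x) (natBL y) >>> 1)) (y >>> (max (natBL x) (natBL y) >>> 1)) ::
        KTask.call (x &&& ((1 <<< (max (natBL x) (natBL y) >>> 1)) - 1)) (y &&& ((1 <<< (max (natBL x) (natBL y) >>> 1)) - 1)) ::
        KTask.call ((x &&& ((1 <<< (max (natBL x) (natBL y) >>> 1)) - 1)) + x >>> (max (natBL x) (natBL y) >>> 1))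
          ((x &&& ((1 <<< (max (natBL x) (natBL y) >>> 1)) - 1)) + (y &&& ((1 <<< (max (natBL x) (natBL y) >>> 1)) - 1))) ::
        KTask.combine (max (natBL x) (natBL y) >>> 1) :: work) vals := by
  rw [karRun]; simp only [hc, if_false]

theorem karRun_combine (h : Nat) (work : List KTask) (z2m z3 z1 : Int) (rest : List Int) :
    karRun (KTask.combine h :: work) (z2m :: z3 :: z1 :: rest) =
      karRun work (((z1 <<< (2 * h)) + ((z2m - z1 - z3) <<< h) + z3) :: rest) := by
  rw [karRun]

theorem kar_cutoff {x y : Nat} (hc : max (natBL x) (natBL y) ≤ 1024) :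
    karatsuba_mul x y = (x : Int) * (y : Int) := by
  rw [karatsuba_mul]; simp only [hc, if_true]

theorem kar_big {x y : Nat} (hc : ¬ max (natBL x) (natBL y) ≤ 1024) :
    karatsuba_mul x y =
      (karatsuba_mul (x >>> (max (natBL x) (natBL y) >>> 1)) (y >>> (max (natBL x) (natBL y) >>> 1)) <<< (2 * (max (natBL x) (natBL y) >>> 1))) +
      ((karatsuba_mul ((x &&& ((1 <<< (max (natBL x) (natBL y) >>> 1)) - 1)) + x >>> (max (natBL x) (natBL y) >>> 1))
          ((x &&& ((1 <<< (max (natBL x) (natBL y) >>> 1)) - 1)) + (y &&& ((1 <<< (max (natBL x) (natBL y) >>> 1)) - 1)))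
        - karatsuba_mul (x >>> (max (natBL x) (natBL y) >>> 1)) (y >>> (max (natBL x) (natBL y) >>> 1))
        - karatsuba_mul (x &&& ((1 <<< (max (natBL x) (natBL y) >>> 1)) - 1)) (y &&& ((1 <<< (max (natBL x) (natBL y) >>> 1)) - 1))) <<< (max (natBL x) (natBL y) >>> 1)) +
      karatsuba_mul (x &&& ((1 <<< (max (natBL x) (natBL y) >>> 1)) - 1)) (y &&& ((1 <<< (max (natBL x) (natBL y) >>> 1)) - 1)) := by
  conv_lhs => rw [karatsuba_mul]
  simp only [hc, if_false]
  congr 2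
  simp [Int.shiftLeft_eq, mul_assoc, ← pow_add, two_mul]

theorem karRun_call (a b : Nat) :
    ∀ (work : List KTask) (vals : List Int),
      karRun (KTask.call a b :: work) vals = karRun work (karatsuba_mul a b :: vals) := by
  induction a, b using karatsuba_mul.induct with
  | case1 a b _ _ _ hle =>
    intro work vals
    rw [karRun_call_cutoff hle, kar_cutoff hle]
  | case2 a b _ _ _ hn _ _ _ _ _ ih1 ih2 ih3 =>
    intro work vals
    rw [karRun_call_big hn, ih1, ih2, ih3, karRun_combine, kar_big hn]

theorem karatsuba_iter_eq (a b : Nat) : karatsuba_iter a b = karatsuba_mul a b := by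
  rw [karatsuba_iter, karRun_call, karRun]
  rfl


-- canonical little-endian packed value of a coefficient list
theorem pack_reflect (s : Nat) (m : Int) (hm : 0 ≤ m) (hmlt : m < 2 ^ s)
    (L : List Int) (n : Nat) (off : Nat) (hoff : off + n = L.length) :
    (List.range n).foldl (fun (a : Int) (i : Nat) => PySem.Int.bor (a <<< s) (PySem.Int.band (PySem.List.pyGetD L (-1 - (i : Int)) 0) m)) 0
      = ∑ j ∈ Finset.range n, PySem.Int.band (L.getD (off + j) 0) m * 2 ^ (s * j) := by
  have hfold := foldA s m hm hmlt
    (fun i => PySem.Int.band (PySem.List.pyGetD L (-1 - (i : Int)) 0) m)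
    (fun i => band_mask_bounds _ m hm) n 0 le_rfl
  beta_reduce at hfold
  rw [hfold, zero_mul, zero_add]
  rw [← Finset.sum_range_reflect (fun j => PySem.Int.band (L.getD (off + j) 0) m * 2 ^ (s * j)) n]
  apply Finset.sum_congr rfl
  intro i hi
  simp only [Finset.mem_range] at hi
  have hidx : (-1 - (i : Int)) = -(((i + 1 : Nat) : Int)) := by push_cast; ring
  rw [hidx, PySem.List.pyGetD_neg_natCast L (i + 1) 0 (by omega) (by omega)]
  have hlt : L.length - (i + 1) < L.length := by omega
  rw [List.getD_eq_getElem L 0 (by omega : off + (n - 1 - i) < L.length)]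
  have : off + (n - 1 - i) = L.length - (i + 1) := by omega
  simp only [this]

theorem mod_by_b_eq (U W : List Int) (b : Int) (hb : 1 ≤ b) (hlen : U.length ≤ W.length) :
    mod_by_b U W b = mod_by_b_alt U W b := by
  simp only [mod_by_b, mod_by_b_alt]
  rw [karatsuba_iter_eq]
  have hm : (0:Int) ≤ b - 1 := by omega
  have hmlt : b - 1 < 2 ^ (3 * (PySem.Int.bitLength b - 1)) := mask_lt hb
  rw [PySem.List.foldl_prod_mk
    (f := fun (a : Int) (i : Nat) => PySem.Int.bor (a <<< (3 * (PySem.Int.bitLength b - 1)))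
      (PySem.Int.band (PySem.List.pyGetD U (-1 - (i : Int)) 0) (b - 1)))
    (g := fun (a : Int) (i : Nat) => PySem.Int.bor (a <<< (3 * (PySem.Int.bitLength b - 1)))
      (PySem.Int.band (PySem.List.pyGetD W (-1 - (i : Int)) 0) (b - 1)))]
  have hAU := pack_reflect _ _ hm hmlt U U.length 0 (by omega)
  have hAW := pack_reflect _ _ hm hmlt W U.length (W.length - U.length) (by omega)
  have hBU := sumB (3 * (PySem.Int.bitLength b - 1)) (b - 1) U 0
  have hslice : PySem.List.slice W (some ((W.length : Int) - (U.length : Int))) none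
      = W.drop (W.length - U.length) := by
    have hc : ((W.length : Int) - (U.length : Int)) = (((W.length - U.length : Nat)) : Int) := by
      push_cast; omega
    rw [hc, PySem.List.slice_from_natCast]
  have hBW := sumB (3 * (PySem.Int.bitLength b - 1)) (b - 1) (W.drop (W.length - U.length)) 0
  have hdroplen : (W.drop (W.length - U.length)).length = U.length := by
    simp [List.length_drop]; omega
  have hdropget : ∀ j, j < U.length →
      (W.drop (W.length - U.length)).getD j 0 = W.getD (W.length - U.length + j) 0 := by
    intro j hj
    rw [List.getD_eq_getElem _ 0 (by omega : j < (W.drop (W.length - U.length)).length),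
        List.getD_eq_getElem W 0 (by omega : W.length - U.length + j < W.length)]
    simp [List.getElem_drop]
  have hBW' : ((PySem.List.enumerate (PySem.List.slice W (some ((W.length : Int) - (U.length : Int))) none)).map
        (fun p => (PySem.Int.band p.2 (b - 1)) <<< ((3 * (PySem.Int.bitLength b - 1)) * p.1.toNat))).sum
      = ∑ j ∈ Finset.range U.length,
          PySem.Int.band (W.getD (W.length - U.length + j) 0) (b - 1) * 2 ^ ((3 * (PySem.Int.bitLength b - 1)) * j) := by
    rw [hslice]
    have h0 : ((0:Nat) : Int) = (0 : Int) := rfl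
    rw [show ((PySem.List.enumerate (W.drop (W.length - U.length))).map
        (fun p => (PySem.Int.band p.2 (b - 1)) <<< ((3 * (PySem.Int.bitLength b - 1)) * p.1.toNat))).sum
      = ((PySem.List.enumerate (W.drop (W.length - U.length)) ((0:Nat) : Int)).map
        (fun p => (PySem.Int.band p.2 (b - 1)) <<< ((3 * (PySem.Int.bitLength b - 1)) * p.1.toNat))).sum from by norm_num]
    rw [hBW, hdroplen]
    apply Finset.sum_congr rfl
    intro j hj
    simp only [Finset.mem_range] at hj
    rw [hdropget j hj]
    norm_num
  have hBU' : ((PySem.List.enumerate U).map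
        (fun p => (PySem.Int.band p.2 (b - 1)) <<< ((3 * (PySem.Int.bitLength b - 1)) * p.1.toNat))).sum
      = ∑ j ∈ Finset.range U.length,
          PySem.Int.band (U.getD j 0) (b - 1) * 2 ^ ((3 * (PySem.Int.bitLength b - 1)) * j) := by
    rw [show ((PySem.List.enumerate U).map
        (fun p => (PySem.Int.band p.2 (b - 1)) <<< ((3 * (PySem.Int.bitLength b - 1)) * p.1.toNat))).sum
      = ((PySem.List.enumerate U ((0:Nat) : Int)).map
        (fun p => (PySem.Int.band p.2 (b - 1)) <<< ((3 * (PySem.Int.bitLength b - 1)) * p.1.toNat))).sum from by norm_num]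
    rw [hBU]
    norm_num
  simp only []
  rw [hAU, hAW, hBU', hBW']
  simp only [zero_add] at *
  rw [extract_loop_eq]

-- ===== VERDICT (by name: the statement is the Claim_ definition above) =====
theorem mod_by_b_spec : Claim_equal_mod_by_b := by
  intro U W b _ hPre
  unfold Spec_mod_by_b
  exact (mod_by_b_eq U W b hPre.1 hPre.2).symm ▸ rfl
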